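-- pv_equiv track=rewrite | github.com/cristinaponay/message-redaction | msgredaction.py | redactAMesage
-- ===== SOURCE A (Python) =====
-- def redactAMesage(in_phrase, in_redactList):
--     ctr = 0
--     out_phrase = ""
--     # iterate through each character in phrase
--     for char in in_phrase:
--         # check if character is in the redact list
--         if char in in_redactList:
--             char = "_"
--             ctr += 1  # counts the number of characters redacted
--         out_phrase += char
--     return ctr, out_phrase    # returns the number of characters redacted and the redacted phrase
-- ===== SOURCE B (Python) =====
-- def redactAMesage(in_phrase, in_redactList):
--     # table-driven: dedupe the redact chars, count via str.count over the set,
--     # redact in one str.translate call (no explicit per-character loop)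
--     chars = set(in_redactList)
--     ctr = sum(in_phrase.count(c) for c in chars)
--     table = {ord(c): "_" for c in chars}
--     return ctr, in_phrase.translate(table)
-- ===== Notes on version B (the rewrite author's own statement) =====
-- stated objective: faster
-- what changed: Replaces the per-character membership-and-branch loop with a deduplicated redact set, a sum of str.count over that set for the counter, and a single str.translate table for the redaction; no explicit per-character Python loop remains.
import Mathlib
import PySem

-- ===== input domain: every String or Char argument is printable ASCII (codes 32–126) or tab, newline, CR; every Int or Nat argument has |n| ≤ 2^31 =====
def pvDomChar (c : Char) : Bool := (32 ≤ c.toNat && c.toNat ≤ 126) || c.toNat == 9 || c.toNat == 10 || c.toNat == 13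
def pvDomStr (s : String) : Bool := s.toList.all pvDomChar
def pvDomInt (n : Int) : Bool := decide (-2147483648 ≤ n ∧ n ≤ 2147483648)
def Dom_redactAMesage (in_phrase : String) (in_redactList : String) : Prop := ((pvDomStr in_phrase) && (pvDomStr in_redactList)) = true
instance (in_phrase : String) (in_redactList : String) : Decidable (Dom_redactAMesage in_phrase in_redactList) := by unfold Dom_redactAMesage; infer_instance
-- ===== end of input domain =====

-- B replaces A's per-character membership-and-branch loop by a deduplicated redact
-- set, a sum of per-character counts over that set, and a translation map (idiomatic;
-- return value only, neither version mutates its arguments).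

-- ===== PORT A =====
-- A: loop over the phrase; 'char in in_redactList' is a single-character substring
-- test, ported as PySem.Str.isIn (exact); the accumulated out_phrase is kept as its
-- char list and packed back into a String at the end.
def redactAMesage (in_phrase : String) (in_redactList : String) : Int × String :=
  let res := in_phrase.toList.foldl
    (fun (acc : Int × List Char) ch =>
      if PySem.Str.isIn (String.singleton ch) in_redactList then
        (acc.1 + 1, acc.2 ++ ['_'])
      else
        (acc.1, acc.2 ++ [ch]))
    (0, [])
  (res.1, String.ofList res.2)

-- ===== PORT B =====
-- B: set(in_redactList) → PySem.Set.ofList; in_phrase.count(c) → PySem.Chars.count;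
-- the sum over the set is order-independent, so iterating the Set's list is exact;
-- str.translate with an every-key-to-'_' table is the per-character replacement map.
def redactAMesage_alt (in_phrase : String) (in_redactList : String) : Int × String :=
  let chars : PySem.Set Char := PySem.Set.ofList in_redactList.toList
  let ctr : Int := (chars.map (fun c => ((PySem.Chars.count in_phrase.toList [c] : Nat) : Int))).sum
  let out := String.ofList (in_phrase.toList.map (fun ch => if PySem.Set.contains chars ch then '_' else ch))
  (ctr, out)

-- ===== PRECONDITION & SPEC =====
def Spec_redactAMesage (in_phrase : String) (in_redactList : String) (out : Int × String) : Prop := out = redactAMesage_alt in_phrase in_redactList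
instance (in_phrase : String) (in_redactList : String) (out : Int × String) : Decidable (Spec_redactAMesage in_phrase in_redactList out) := by unfold Spec_redactAMesage; infer_instance

-- ===== CLAIM (what is proved, stated in full; the proofs are below) =====
def Claim_equal_redactAMesage : Prop := ∀ (in_phrase : String) (in_redactList : String), Dom_redactAMesage in_phrase in_redactList → Spec_redactAMesage in_phrase in_redactList (redactAMesage in_phrase in_redactList)

-- ===== LEMMAS AND PROOFS =====

-- Chars.count with a singleton needle is the plain element count.
theorem pv_count_go_singleton (c : Char) (fuel : Nat) (l : List Char) (acc : Nat) (h : l.length ≤ fuel) :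
    PySem.Chars.count.go [c] fuel l acc = acc + l.count c := by
  induction fuel generalizing l acc with
  | zero =>
    have : l = [] := List.eq_nil_of_length_eq_zero (Nat.le_zero.mp h)
    subst this; simp [PySem.Chars.count.go]
  | succ n ih =>
    cases l with
    | nil => simp [PySem.Chars.count.go]
    | cons hd t =>
      have ht : t.length ≤ n := by simpa using Nat.le_of_succ_le_succ h
      simp only [PySem.Chars.count.go]
      by_cases hc : hd = c
      · subst hc
        simp [List.isPrefixOf, ih t (acc + 1) ht]
        omega
      · have hp : List.isPrefixOf [c] (hd :: t) = false := by
          simp only [List.isPrefixOf, Bool.and_eq_false_iff]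
          left
          exact beq_eq_false_iff_ne.mpr (Ne.symm hc)
        simp [hp, ih t acc ht, List.count_cons]
        exact fun e => hc e

theorem pv_count_singleton (l : List Char) (c : Char) : PySem.Chars.count l [c] = l.count c := by
  simp [PySem.Chars.count, pv_count_go_singleton c l.length l 0 le_rfl]

-- 'c in s' for a single character is list membership.
theorem pv_isIn_singleton (c : Char) (s : String) :
    PySem.Str.isIn (String.singleton c) s = decide (c ∈ s.toList) := by
  by_cases h : c ∈ s.toList
  · have : PySem.Chars.isIn [c] s.toList = true := by
      rw [PySem.Chars.isIn_iff_infix]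
      obtain ⟨l₁, l₂, hl⟩ := List.append_of_mem h
      exact ⟨l₁, l₂, by rw [hl]; simp⟩
    simp [this, h]
  · have : PySem.Chars.isIn [c] s.toList = false := by
      rw [PySem.Chars.isIn_eq_false_iff]
      rintro ⟨l₁, l₂, hl⟩
      exact h (by rw [← hl]; simp)
    simp [this, h]

-- A 0/1 indicator summed over a list is the element count.
theorem pv_sum_indicator (ch : Char) (s : List Char) :
    (s.map (fun c => (if ch = c then (1 : Int) else 0))).sum = (s.count ch : Int) := by
  induction s with
  | nil => simp
  | cons a t ih =>
    simp only [List.map_cons, List.sum_cons, ih, List.count_cons]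
    by_cases h : ch = a
    · subst h; simp; ring
    · simp [h]
      exact fun e => h (Eq.symm e)

-- The sum of per-character counts over a duplicate-free set is a countP.
theorem pv_sum_count (s p : List Char) (hs : s.Nodup) :
    (s.map (fun c => ((p.count c : Nat) : Int))).sum
      = ((p.countP (fun ch => decide (ch ∈ s)) : Nat) : Int) := by
  induction p with
  | nil => simp
  | cons ch p ih =>
    have hsplit : (s.map (fun c => (((ch :: p).count c : Nat) : Int))).sum
        = (s.map (fun c => ((p.count c : Nat) : Int))).sum
          + (s.map (fun c => (if ch = c then (1 : Int) else 0))).sum := by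
      rw [← List.sum_map_add]
      apply congrArg List.sum
      apply List.map_congr_left
      intro c _
      simp only [List.count_cons]
      by_cases h : c = ch <;> simp [h]
    rw [hsplit, ih, pv_sum_indicator, List.countP_cons]
    by_cases h : ch ∈ s
    · simp [h, List.count_eq_one_of_mem hs h]
    · simp [h, List.count_eq_zero.mpr h]

-- A's fold with the membership test already reduced to list membership.
theorem pv_foldA_mem (rl : String) (p : List Char) (ctr : Int) (out : List Char) :
    p.foldl
      (fun (acc : Int × List Char) ch =>
        if ch ∈ rl.toList then (acc.1 + 1, acc.2 ++ ['_']) else (acc.1, acc.2 ++ [ch]))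
      (ctr, out)
      = (ctr + ((p.countP (fun ch => decide (ch ∈ rl.toList)) : Nat) : Int),
         out ++ p.map (fun ch => if ch ∈ rl.toList then '_' else ch)) := by
  induction p generalizing ctr out with
  | nil => simp
  | cons ch p ih =>
    simp only [List.foldl_cons]
    by_cases h : ch ∈ rl.toList
    · simp only [h, if_true, ih, List.countP_cons, List.map_cons]
      refine Prod.ext ?_ (by simp)
      simp
      ring
    · simp only [h, if_false, ih, List.countP_cons, List.map_cons]
      refine Prod.ext (by simp) (by simp)

-- A's fold maintains (count so far, redacted prefix).
theorem pv_foldA (rl : String) (p : List Char) (ctr : Int) (out : List Char) :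
    p.foldl
      (fun (acc : Int × List Char) ch =>
        if PySem.Str.isIn (String.singleton ch) rl then
          (acc.1 + 1, acc.2 ++ ['_'])
        else
          (acc.1, acc.2 ++ [ch]))
      (ctr, out)
      = (ctr + ((p.countP (fun ch => decide (ch ∈ rl.toList)) : Nat) : Int),
         out ++ p.map (fun ch => if ch ∈ rl.toList then '_' else ch)) := by
  have hfun : (fun (acc : Int × List Char) ch =>
        if PySem.Str.isIn (String.singleton ch) rl then (acc.1 + 1, acc.2 ++ ['_'])
        else (acc.1, acc.2 ++ [ch]))
      = (fun (acc : Int × List Char) ch =>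
        if ch ∈ rl.toList then (acc.1 + 1, acc.2 ++ ['_']) else (acc.1, acc.2 ++ [ch])) := by
    funext acc ch
    rw [pv_isIn_singleton]
    simp
  rw [hfun, pv_foldA_mem]

-- ===== VERDICT (by name: the statement is the Claim_ definition above) =====
theorem redactAMesage_spec : Claim_equal_redactAMesage := by
  intro p r _
  unfold Spec_redactAMesage redactAMesage redactAMesage_alt
  rw [pv_foldA]
  refine Prod.ext ?_ ?_
  · simp only [pv_count_singleton]
    rw [pv_sum_count _ _ (PySem.Set.nodup_ofList _)]
    simp [PySem.Set.mem_ofList]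
  · simp only [List.nil_append]
    apply congrArg String.ofList
    apply List.map_congr_left
    intro ch _
    by_cases h : ch ∈ r.toList
    · simp [h, PySem.Set.mem_ofList]
    · simp [h, PySem.Set.mem_ofList]
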